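-- pv_equiv track=rewrite | github.com/mrbacklog/oranje-wit | scripts/python/vergelijk-preseason.py | teams_equivalent
-- ===== SOURCE A (Python) =====
-- COMBINED_TEAMS = {
--     "S1S2": {"S1", "S2", "S1S2"},
--     "A1A2": {"A1", "A2", "A1A2"},
--     "B1B2": {"B1", "B2", "B1B2"},
--     "S5S6S7": {"S5", "S6", "S7", "S5S6", "S5S6S7", "S5-6-7", "S567"},
--     "S3S4": {"S3", "S4", "S3S4"},
--     "U17-1U17-2": {"U17", "U17-1", "U17-2", "U17-1U17-2"},
--     "U19-1U19-2": {"U19", "U19-1", "U19-2", "U19-1U19-2"},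
-- }
--
-- def teams_equivalent(team_a, team_b):
--     """Check of twee teams equivalent zijn (inclusief combinatie-teams)."""
--     if not team_a or not team_b:
--         return False
--     if team_a == team_b:
--         return True
--     for combined, members in COMBINED_TEAMS.items():
--         if team_a in members and team_b in members:
--             return True
--         if team_a == combined and team_b in members:
--             return True
--         if team_b == combined and team_a in members:
--             return True
--     return False
-- ===== SOURCE B (Python) =====
-- COMBINED_TEAMS = {
--     "S1S2": {"S1", "S2", "S1S2"},
--     "A1A2": {"A1", "A2", "A1A2"},
--     "B1B2": {"B1", "B2", "B1B2"},
--     "S5S6S7": {"S5", "S6", "S7", "S5S6", "S5S6S7", "S5-6-7", "S567"},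
--     "S3S4": {"S3", "S4", "S3S4"},
--     "U17-1U17-2": {"U17", "U17-1", "U17-2", "U17-1U17-2"},
--     "U19-1U19-2": {"U19", "U19-1", "U19-2", "U19-1U19-2"},
-- }
--
-- # Inverted index: each member name -> its combined-group key (built once).
-- _TEAM_INDEX = {member: group
--                for group, members in COMBINED_TEAMS.items()
--                for member in members}
--
-- def teams_equivalent(team_a, team_b):
--     """Check of twee teams equivalent zijn (inclusief combinatie-teams)."""
--     if not team_a or not team_b:
--         return False
--     if team_a == team_b:
--         return True
--     group = _TEAM_INDEX.get(team_a)
--     return group is not None and group == _TEAM_INDEX.get(team_b)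
-- ===== Notes on version B (the rewrite author's own statement) =====
-- stated objective: simpler
-- what changed: Replaced the per-call scan over the 7 combined groups (three membership branches each) with a precomputed member->group inverted index, so a call is just two dictionary lookups compared for equality.
import Mathlib
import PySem

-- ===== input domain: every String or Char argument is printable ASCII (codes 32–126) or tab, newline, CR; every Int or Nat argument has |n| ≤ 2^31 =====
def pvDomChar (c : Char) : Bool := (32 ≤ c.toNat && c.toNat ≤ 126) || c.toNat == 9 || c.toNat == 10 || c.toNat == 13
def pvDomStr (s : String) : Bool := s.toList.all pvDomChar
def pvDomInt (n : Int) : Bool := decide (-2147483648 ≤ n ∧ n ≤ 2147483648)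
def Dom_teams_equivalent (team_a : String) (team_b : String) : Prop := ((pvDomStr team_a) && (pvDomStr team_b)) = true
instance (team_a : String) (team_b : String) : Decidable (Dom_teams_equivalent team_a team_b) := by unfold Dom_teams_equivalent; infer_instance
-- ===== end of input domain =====

-- B replaces A's per-call scan over the 7 combined groups by a precomputed
-- member->group inverted index consulted with two lookups (objective: simpler).


-- ===== PORT A =====
-- COMBINED_TEAMS: dict of set literals -> association list of member lists (membership only).
def pvCombinedTeams : List (String × List String) :=
  [("S1S2", ["S1", "S2", "S1S2"]),
   ("A1A2", ["A1", "A2", "A1A2"]),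
   ("B1B2", ["B1", "B2", "B1B2"]),
   ("S5S6S7", ["S5", "S6", "S7", "S5S6", "S5S6S7", "S5-6-7", "S567"]),
   ("S3S4", ["S3", "S4", "S3S4"]),
   ("U17-1U17-2", ["U17", "U17-1", "U17-2", "U17-1U17-2"]),
   ("U19-1U19-2", ["U19", "U19-1", "U19-2", "U19-1U19-2"])]

-- the `for combined, members in COMBINED_TEAMS.items()` loop with early returns
def teamsLoopA (a b : String) : List (String × List String) → Bool
  | [] => false
  | (combined, members) :: rest =>
    if a ∈ members ∧ b ∈ members then true
    else if a = combined ∧ b ∈ members then true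
    else if b = combined ∧ a ∈ members then true
    else teamsLoopA a b rest

def teams_equivalent (team_a : String) (team_b : String) : Bool :=
  if team_a = "" ∨ team_b = "" then false
  else if team_a = team_b then true
  else teamsLoopA team_a team_b pvCombinedTeams

-- ===== PORT B =====
-- the dict comprehension {member: group for group, members in ... for member in members}
def pvTeamIndex : PySem.Dict String String :=
  PySem.Dict.mk (pvCombinedTeams.flatMap (fun p => p.2.map (fun m => (m, p.1))))

def teams_equivalent_alt (team_a : String) (team_b : String) : Bool :=
  if team_a = "" ∨ team_b = "" then false
  else if team_a = team_b then true
  else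
    match pvTeamIndex.get? team_a with
    | none => false
    | some group =>
      match pvTeamIndex.get? team_b with
      | none => false
      | some group_b => group == group_b

-- ===== PRECONDITION & SPEC =====
def Spec_teams_equivalent (team_a : String) (team_b : String) (out : Bool) : Prop := out = teams_equivalent_alt team_a team_b
instance (team_a : String) (team_b : String) (out : Bool) : Decidable (Spec_teams_equivalent team_a team_b out) := by unfold Spec_teams_equivalent; infer_instance

-- ===== CLAIM (what is proved, stated in full; the proofs are below) =====
def Claim_equal_teams_equivalent : Prop := ∀ (team_a : String) (team_b : String), Dom_teams_equivalent team_a team_b → Spec_teams_equivalent team_a team_b (teams_equivalent team_a team_b)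

-- ===== LEMMAS AND PROOFS =====

-- first-match group lookup over the group list (abstract view of B's index lookup)
def lookupIdx (x : String) : List (String × List String) → Option String
  | [] => none
  | (g, ms) :: rest => if x ∈ ms then some g else lookupIdx x rest

theorem get?_map_append (x g : String) (ms : List String) (d : List (String × String)) :
    (PySem.Dict.mk (ms.map (fun m => (m, g)) ++ d)).get? x
      = if x ∈ ms then some g else (PySem.Dict.mk d).get? x := by
  induction ms with
  | nil => simp
  | cons m tl ih =>
    simp only [List.map_cons, List.cons_append, PySem.Dict.get?_mk_cons, ih, List.mem_cons]
    by_cases h : m = x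
    · subst h; simp
    · simp [Ne.symm h, beq_eq_false_iff_ne.mpr h]

theorem get?_flatten (x : String) (L : List (String × List String)) :
    (PySem.Dict.mk (L.flatMap (fun p => p.2.map (fun m => (m, p.1))))).get? x = lookupIdx x L := by
  induction L with
  | nil => rfl
  | cons p tl ih =>
    obtain ⟨g, ms⟩ := p
    simp only [List.flatMap_cons, get?_map_append, ih, lookupIdx]

theorem lookupIdx_some (x k : String) (L : List (String × List String))
    (h : lookupIdx x L = some k) : ∃ q ∈ L, q.1 = k ∧ x ∈ q.2 := by
  induction L with
  | nil => simp [lookupIdx] at h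
  | cons p tl ih =>
    obtain ⟨g, ms⟩ := p
    simp only [lookupIdx] at h
    by_cases hx : x ∈ ms
    · simp [hx] at h; exact ⟨(g, ms), by simp, h, hx⟩
    · simp [hx] at h
      obtain ⟨q, hq, hk, hxq⟩ := ih h
      exact ⟨q, by simp [hq], hk, hxq⟩

-- if a occurs in no member set of L, the loop over L returns false
theorem loopA_false_left (a b : String) (L : List (String × List String))
    (hself : ∀ p ∈ L, p.1 ∈ p.2) (ha : ∀ q ∈ L, a ∉ q.2) :
    teamsLoopA a b L = false := by
  induction L with
  | nil => rfl
  | cons p tl ih =>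
    obtain ⟨g, ms⟩ := p
    have hgms : g ∈ ms := hself (g, ms) (by simp)
    have hams : a ∉ ms := ha (g, ms) (by simp)
    have h2 : ¬(a = g ∧ b ∈ ms) := fun ⟨hag, _⟩ => hams (hag ▸ hgms)
    have h3 : ¬(b = g ∧ a ∈ ms) := fun ⟨_, h⟩ => hams h
    simp only [teamsLoopA]
    rw [if_neg (fun ⟨h, _⟩ => hams h), if_neg h2, if_neg h3]
    exact ih (fun p hp => hself p (by simp [hp])) (fun q hq => ha q (by simp [hq]))

-- symmetric: if b occurs in no member set of L
theorem loopA_false_right (a b : String) (L : List (String × List String))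
    (hself : ∀ p ∈ L, p.1 ∈ p.2) (hb : ∀ q ∈ L, b ∉ q.2) :
    teamsLoopA a b L = false := by
  induction L with
  | nil => rfl
  | cons p tl ih =>
    obtain ⟨g, ms⟩ := p
    have hgms : g ∈ ms := hself (g, ms) (by simp)
    have hbms : b ∉ ms := hb (g, ms) (by simp)
    have h3 : ¬(b = g ∧ a ∈ ms) := fun ⟨hbg, _⟩ => hbms (hbg ▸ hgms)
    simp only [teamsLoopA]
    rw [if_neg (fun ⟨_, h⟩ => hbms h), if_neg (fun ⟨_, h⟩ => hbms h), if_neg h3]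
    exact ih (fun p hp => hself p (by simp [hp])) (fun q hq => hb q (by simp [hq]))

-- main: the 3-branch scan equals comparing the two first-match group lookups
theorem loopA_eq_lookup (a b : String) (L : List (String × List String))
    (hself : ∀ p ∈ L, p.1 ∈ p.2)
    (hdisj : List.Pairwise (fun p q => ∀ x ∈ p.2, x ∉ q.2) L) :
    teamsLoopA a b L = (match lookupIdx a L, lookupIdx b L with
      | some ga, some gb => ga == gb
      | _, _ => false) := by
  induction L with
  | nil => rfl
  | cons p tl ih =>
    obtain ⟨g, ms⟩ := p
    rw [List.pairwise_cons] at hdisj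
    obtain ⟨hd, htl⟩ := hdisj
    have hgms : g ∈ ms := hself (g, ms) (by simp)
    have hselftl : ∀ p ∈ tl, p.1 ∈ p.2 := fun p hp => hself p (by simp [hp])
    by_cases ha : a ∈ ms <;> by_cases hb : b ∈ ms
    · simp [teamsLoopA, lookupIdx, ha, hb]
    · -- a ∈ ms, b ∉ ms: loop continues and stays false; lookups disagree
      have h3 : ¬(b = g ∧ a ∈ ms) := fun ⟨hbg, _⟩ => hb (hbg ▸ hgms)
      simp only [teamsLoopA, lookupIdx]
      rw [if_neg (fun ⟨_, h⟩ => hb h), if_neg (fun ⟨_, h⟩ => hb h), if_neg h3,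
          if_pos ha, if_neg hb]
      rw [loopA_false_left a b tl hselftl (fun q hq => hd q hq a ha)]
      cases hlb : lookupIdx b tl with
      | none => rfl
      | some gb =>
        obtain ⟨q, hq, hk, hbq⟩ := lookupIdx_some b gb tl hlb
        have : g ∉ q.2 := hd q hq g hgms
        have hne : g ≠ gb := fun h => this (h ▸ hk ▸ hselftl q hq)
        simp [beq_eq_false_iff_ne.mpr hne]
    · -- b ∈ ms, a ∉ ms
      have h2 : ¬(a = g ∧ b ∈ ms) := fun ⟨hag, _⟩ => ha (hag ▸ hgms)
      simp only [teamsLoopA, lookupIdx]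
      rw [if_neg (fun ⟨h, _⟩ => ha h), if_neg h2, if_neg (fun ⟨_, h⟩ => ha h),
          if_neg ha, if_pos hb]
      rw [loopA_false_right a b tl hselftl (fun q hq => hd q hq b hb)]
      cases hla : lookupIdx a tl with
      | none => rfl
      | some ga =>
        obtain ⟨q, hq, hk, haq⟩ := lookupIdx_some a ga tl hla
        have : g ∉ q.2 := hd q hq g hgms
        have hne : ga ≠ g := fun h => this (h ▸ hk ▸ hselftl q hq)
        simp [beq_eq_false_iff_ne.mpr hne]
    · -- neither in ms: both sides recurse
      have h2 : ¬(a = g ∧ b ∈ ms) := fun ⟨hag, _⟩ => ha (hag ▸ hgms)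
      have h3 : ¬(b = g ∧ a ∈ ms) := fun ⟨_, h⟩ => ha h
      simp only [teamsLoopA, lookupIdx]
      rw [if_neg (fun ⟨h, _⟩ => ha h), if_neg h2, if_neg h3, if_neg ha, if_neg hb]
      exact ih hselftl htl

theorem pvCombined_self : ∀ p ∈ pvCombinedTeams, p.1 ∈ p.2 := by decide

theorem pvCombined_disj :
    List.Pairwise (fun p q => ∀ x ∈ p.2, x ∉ q.2)
      ([("S1S2", ["S1", "S2", "S1S2"]),
        ("A1A2", ["A1", "A2", "A1A2"]),
        ("B1B2", ["B1", "B2", "B1B2"]),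
        ("S5S6S7", ["S5", "S6", "S7", "S5S6", "S5S6S7", "S5-6-7", "S567"]),
        ("S3S4", ["S3", "S4", "S3S4"]),
        ("U17-1U17-2", ["U17", "U17-1", "U17-2", "U17-1U17-2"]),
        ("U19-1U19-2", ["U19", "U19-1", "U19-2", "U19-1U19-2"])] :
        List (String × List String)) := by
  decide

-- ===== VERDICT (by name: the statement is the Claim_ definition above) =====
theorem teams_equivalent_spec : Claim_equal_teams_equivalent := by
  intro a b _
  unfold Spec_teams_equivalent teams_equivalent teams_equivalent_alt
  by_cases h0 : a = "" ∨ b = ""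
  · simp [h0]
  · rw [if_neg h0, if_neg h0]
    by_cases hab : a = b
    · simp [hab]
    · rw [if_neg hab, if_neg hab]
      have hidx : ∀ x, pvTeamIndex.get? x = lookupIdx x pvCombinedTeams :=
        fun x => get?_flatten x pvCombinedTeams
      rw [hidx a, hidx b,
          loopA_eq_lookup a b pvCombinedTeams pvCombined_self pvCombined_disj]
      cases lookupIdx a pvCombinedTeams <;> cases lookupIdx b pvCombinedTeams <;> rfl
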